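-- pv_equiv track=rewrite | github.com/AurelioMiranda/kalkulator | main.py | FilterOpp
-- ===== SOURCE A (Python) =====
-- def FilterOpp(op):
--     x = ""
--     for n in op:
--         if n == "+" or n == "-" or n == "*" or n == "/":
--             x = n
--     if x == "":
--         x = "+"
--     return x
-- ===== SOURCE B (Python) =====
-- def FilterOpp(op):
--     for n in reversed(op):
--         if n in "+-*/":
--             return n
--     return "+"
-- ===== Notes on version B (the rewrite author's own statement) =====
-- stated objective: simpler
-- what changed: B scans the string backwards and returns immediately at the first operator found, instead of A's forward pass over every character that keeps overwriting an accumulator and patches the empty case afterwards.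
import Mathlib
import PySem

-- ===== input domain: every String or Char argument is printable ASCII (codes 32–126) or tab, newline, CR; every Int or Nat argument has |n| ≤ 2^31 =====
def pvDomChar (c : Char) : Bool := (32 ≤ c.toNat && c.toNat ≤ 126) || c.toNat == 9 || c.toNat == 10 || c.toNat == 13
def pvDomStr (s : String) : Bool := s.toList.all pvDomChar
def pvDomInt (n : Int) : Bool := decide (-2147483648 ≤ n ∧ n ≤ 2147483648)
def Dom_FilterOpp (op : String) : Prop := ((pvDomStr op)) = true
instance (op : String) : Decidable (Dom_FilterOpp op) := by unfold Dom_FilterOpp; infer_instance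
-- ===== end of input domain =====

-- B scans the string backwards and returns the first operator found (no accumulator); same return value as A.


-- ===== PORT A =====
def FilterOpp (op : String) : String :=
  let x := op.toList.foldl
    (fun x n => if n = '+' ∨ n = '-' ∨ n = '*' ∨ n = '/' then String.mk [n] else x) ""
  if x = "" then "+" else x

-- ===== PORT B =====
-- the early-return loop of Source B over the reversed characters
def FilterOppGo : List Char → String
  | [] => "+"
  | n :: rest => if n = '+' ∨ n = '-' ∨ n = '*' ∨ n = '/' then String.mk [n] else FilterOppGo rest

def FilterOpp_alt (op : String) : String := FilterOppGo op.toList.reverse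

-- ===== PRECONDITION & SPEC =====
def Spec_FilterOpp (op : String) (out : String) : Prop := out = FilterOpp_alt op
instance (op : String) (out : String) : Decidable (Spec_FilterOpp op out) := by unfold Spec_FilterOpp; infer_instance

-- ===== CLAIM (what is proved, stated in full; the proofs are below) =====
def Claim_equal_FilterOpp : Prop := ∀ (op : String), Dom_FilterOpp op → Spec_FilterOpp op (FilterOpp op)

-- ===== LEMMAS AND PROOFS =====
-- A's loop body as a function
def fopStep (x : String) (n : Char) : String :=
  if n = '+' ∨ n = '-' ∨ n = '*' ∨ n = '/' then String.mk [n] else x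

-- B's loop generalized over the fall-through value
def fopGoAux (l : List Char) (s : String) : String :=
  match l with
  | [] => s
  | n :: rest => if n = '+' ∨ n = '-' ∨ n = '*' ∨ n = '/' then String.mk [n] else fopGoAux rest s

theorem fopGoAux_append (r t : List Char) (s : String) :
    fopGoAux (r ++ t) s = fopGoAux r (fopGoAux t s) := by
  induction r with
  | nil => rfl
  | cons n rest ih => simp [fopGoAux, ih]

theorem foldl_eq_goAux (l : List Char) (s : String) :
    l.foldl fopStep s = fopGoAux l.reverse s := by
  induction l generalizing s with
  | nil => rfl
  | cons n rest ih =>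
      simp only [List.foldl_cons, List.reverse_cons]
      rw [ih, fopGoAux_append]
      rfl

theorem goAux_default (l : List Char) :
    FilterOppGo l = if fopGoAux l "" = "" then "+" else fopGoAux l "" := by
  induction l with
  | nil => rfl
  | cons n rest ih =>
      by_cases h : n = '+' ∨ n = '-' ∨ n = '*' ∨ n = '/'
      · simp [FilterOppGo, fopGoAux, h]
        rcases h with h | h | h | h <;> subst h <;> decide
      · simpa [FilterOppGo, fopGoAux, h] using ih

-- ===== VERDICT (by name: the statement is the Claim_ definition above) =====
theorem FilterOpp_spec : Claim_equal_FilterOpp := by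
  intro op _
  show FilterOpp op = FilterOpp_alt op
  unfold FilterOpp FilterOpp_alt
  rw [show (fun (x : String) (n : Char) =>
        if n = '+' ∨ n = '-' ∨ n = '*' ∨ n = '/' then String.mk [n] else x) = fopStep from rfl,
      foldl_eq_goAux, goAux_default]
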